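-- pv_equiv track=rewrite | github.com/zachary-zzc/mosaic | _diag_deep.py | count_neighbors_at_hop
-- ===== SOURCE A (Python) =====
-- from collections import defaultdict
-- from collections import deque
--
-- def count_neighbors_at_hop(adj, seeds, max_hops):
--     """Count how many unique neighbors at each hop distance."""
--     visited = {s: 0 for s in seeds}
--     queue = deque((s, 0) for s in seeds)
--     hop_counts = defaultdict(int)
--     while queue:
--         u, d = queue.popleft()
--         if d >= max_hops:
--             continue
--         for v in adj.get(u, ()):
--             if v not in visited:
--                 visited[v] = d + 1
--                 queue.append((v, d + 1))
--                 if v not in seeds: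
--                     hop_counts[d + 1] += 1
--     return dict(hop_counts)
-- ===== SOURCE B (Python) =====
-- def count_neighbors_at_hop(adj, seeds, max_hops):
--     """Count how many unique neighbors at each hop distance (level-synchronous BFS)."""
--     visited = set(seeds)
--     frontier = list(seeds)
--     hop_counts = {}
--     hop = 0
--     while frontier and hop < max_hops:
--         hop += 1
--         nxt = []
--         for u in frontier:
--             for v in adj.get(u, ()):
--                 if v not in visited:
--                     visited.add(v)
--                     nxt.append(v)
--         if nxt:
--             hop_counts[hop] = len(nxt)
--         frontier = nxt
--     return hop_counts
-- ===== Notes on version B (the rewrite author's own statement) =====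
-- stated objective: simpler
-- what changed: Replaces the distance-tagged deque BFS (dict of node->distance, defaultdict of counts, redundant 'v not in seeds' test) with a level-synchronous BFS that keeps a visited set and an explicit per-hop frontier list, recording the frontier length per hop.
import Mathlib
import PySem

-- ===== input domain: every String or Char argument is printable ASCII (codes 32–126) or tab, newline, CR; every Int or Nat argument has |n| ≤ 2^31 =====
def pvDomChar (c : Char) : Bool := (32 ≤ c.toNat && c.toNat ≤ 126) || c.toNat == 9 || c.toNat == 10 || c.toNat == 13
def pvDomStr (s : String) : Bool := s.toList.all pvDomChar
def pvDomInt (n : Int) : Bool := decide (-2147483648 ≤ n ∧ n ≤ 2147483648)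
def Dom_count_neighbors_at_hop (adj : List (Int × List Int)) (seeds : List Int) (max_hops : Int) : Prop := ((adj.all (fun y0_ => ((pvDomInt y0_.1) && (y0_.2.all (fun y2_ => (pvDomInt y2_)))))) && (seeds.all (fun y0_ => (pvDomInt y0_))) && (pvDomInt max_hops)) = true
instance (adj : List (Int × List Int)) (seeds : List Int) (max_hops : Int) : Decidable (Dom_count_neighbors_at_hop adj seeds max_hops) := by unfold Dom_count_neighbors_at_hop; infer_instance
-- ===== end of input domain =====

-- B replaces A's distance-tagged deque BFS with a level-synchronous BFS (visited set + per-hop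
-- frontier list), recording each nonempty frontier's length; objective: simpler.

-- ===== PORT A =====
-- one neighbour v of a node popped at distance d: the body of A's inner 'for v in adj.get(u, ())'
def pvAStep (seeds : List Int) (d : Int)
    (st : PySem.Dict Int Int × List (Int × Int) × PySem.Dict Int Int) (v : Int) :
    PySem.Dict Int Int × List (Int × Int) × PySem.Dict Int Int :=
  if st.1.contains v then st            -- 'if v not in visited' fails: nothing happens
  else
    let vd := st.1.insert v (d + 1)     -- visited[v] = d + 1
    let q := st.2.1 ++ [(v, d + 1)]     -- queue.append((v, d + 1))
    let hc := if seeds.contains v then st.2.2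
              else st.2.2.modify (d + 1) 0 (· + 1)   -- hop_counts[d+1] += 1 (defaultdict)
    (vd, q, hc)

-- A's 'while queue' loop; fuel only makes the recursion total (popping cannot outrun
-- |seeds| + total adjacency length enqueues, see pvOuter below)
def pvALoop (adjD : PySem.Dict Int (List Int)) (seeds : List Int) (maxh : Int) :
    Nat → List (Int × Int) → PySem.Dict Int Int → PySem.Dict Int Int → PySem.Dict Int Int
  | 0, _, _, hc => hc
  | _ + 1, [], _, hc => hc
  | fuel + 1, (u, d) :: rest, vd, hc =>
    if maxh ≤ d then pvALoop adjD seeds maxh fuel rest vd hc   -- 'if d >= max_hops: continue'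
    else
      let st := (adjD.getD u []).foldl (pvAStep seeds d) (vd, rest, hc)
      pvALoop adjD seeds maxh fuel st.2.1 st.1 st.2.2

def count_neighbors_at_hop (adj : List (Int × List Int)) (seeds : List Int) (max_hops : Int) :
    List (Int × Int) :=
  let adjD : PySem.Dict Int (List Int) := PySem.Dict.mk adj
  let visited := seeds.foldl (fun d s => d.insert s (0 : Int)) PySem.Dict.empty  -- {s: 0 for s in seeds}
  let queue := seeds.map (fun s => (s, (0 : Int)))                               -- deque((s, 0) ...)
  let fuel := seeds.length + (adj.flatMap (fun p => p.2)).length + 1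
  (pvALoop adjD seeds max_hops fuel queue visited PySem.Dict.empty).items

-- ===== PORT B =====
-- 'if v not in visited: visited.add(v); nxt.append(v)'
def pvBStep (st : PySem.Set Int × List Int) (v : Int) : PySem.Set Int × List Int :=
  if st.1.contains v then st else (PySem.Set.add st.1 v, st.2 ++ [v])

-- inner 'for v in adj.get(u, ())'
def pvBNode (adjD : PySem.Dict Int (List Int)) (st : PySem.Set Int × List Int) (u : Int) :
    PySem.Set Int × List Int :=
  (adjD.getD u []).foldl pvBStep st

-- 'if nxt: hop_counts[hop] = len(nxt)'
def pvCond (hc : PySem.Dict Int Int) (k : Int) (nxt : List Int) : PySem.Dict Int Int :=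
  if nxt.isEmpty then hc else hc.insert k (nxt.length : Int)

-- 'while frontier and hop < max_hops' — the hop counter is bounded by max_hops, so the
-- remaining iteration count (max_hops - hop).toNat drives the recursion
def pvBLoop (adjD : PySem.Dict Int (List Int)) :
    Nat → Int → List Int → PySem.Set Int → PySem.Dict Int Int → PySem.Dict Int Int
  | 0, _, _, _, hc => hc
  | rem + 1, hop, frontier, visited, hc =>
    if frontier.isEmpty then hc
    else
      let st := frontier.foldl (pvBNode adjD) (visited, [])
      pvBLoop adjD rem (hop + 1) st.2 st.1 (pvCond hc (hop + 1) st.2)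

def count_neighbors_at_hop_alt (adj : List (Int × List Int)) (seeds : List Int) (max_hops : Int) :
    List (Int × Int) :=
  let adjD : PySem.Dict Int (List Int) := PySem.Dict.mk adj
  (pvBLoop adjD max_hops.toNat 0 seeds (PySem.Set.ofList seeds) PySem.Dict.empty).items

-- ===== PRECONDITION & SPEC =====
def Spec_count_neighbors_at_hop (adj : List (Int × List Int)) (seeds : List Int) (max_hops : Int) (out : List (Int × Int)) : Prop := out = count_neighbors_at_hop_alt adj seeds max_hops
instance (adj : List (Int × List Int)) (seeds : List Int) (max_hops : Int) (out : List (Int × Int)) : Decidable (Spec_count_neighbors_at_hop adj seeds max_hops out) := by unfold Spec_count_neighbors_at_hop; infer_instance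

-- ===== CLAIM (what is proved, stated in full; the proofs are below) =====
def Claim_equal_count_neighbors_at_hop : Prop := ∀ (adj : List (Int × List Int)) (seeds : List Int) (max_hops : Int), Dom_count_neighbors_at_hop adj seeds max_hops → Spec_count_neighbors_at_hop adj seeds max_hops (count_neighbors_at_hop adj seeds max_hops)

-- ===== LEMMAS AND PROOFS =====

-- all neighbour values appearing in adjD
def pvFlat (adjD : PySem.Dict Int (List Int)) : List Int := adjD.items.flatMap (fun p => p.2)

theorem pvModify_eq_insert (d : PySem.Dict Int Int) (k d0 : Int) (f : Int → Int) :
    d.modify k d0 f = d.insert k (f (d.getD k d0)) := rfl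

theorem pvMem_getD_flat (adjD : PySem.Dict Int (List Int)) (u v : Int)
    (h : v ∈ adjD.getD u []) : v ∈ pvFlat adjD := by
  rw [PySem.Dict.getD_eq_get?_getD] at h
  cases hg : adjD.get? u with
  | none => rw [hg] at h; simp at h
  | some l =>
    rw [hg] at h
    simp only [Option.getD_some] at h
    have hm : (u, l) ∈ adjD.items := PySem.Dict.mem_items_of_get?_eq_some adjD hg
    exact List.mem_flatMap.mpr ⟨(u, l), hm, h⟩

theorem pvCond_bump (hc : PySem.Dict Int Int) (k : Int) (nxt : List Int) (v : Int)
    (hk : hc.contains k = false) :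
    (pvCond hc k nxt).modify k 0 (· + 1) = pvCond hc k (nxt ++ [v]) := by
  rw [pvModify_eq_insert]
  cases nxt with
  | nil =>
    have h0 : hc.getD k 0 = 0 := PySem.Dict.getD_of_not_contains hc 0 hk
    simp [pvCond, h0]
  | cons a t =>
    simp [pvCond, PySem.Dict.getD_insert_self, PySem.Dict.insert_insert_self]

-- processing one adjacency list: A's inner fold and B's inner fold move in lockstep
theorem pvNode_corr (seeds : List Int) (d : Int) (hc0 : PySem.Dict Int Int)
    (hhc : hc0.contains (d + 1) = false) :
    ∀ (ns : List Int) (vd : PySem.Dict Int Int) (vs : PySem.Set Int)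
      (q : List (Int × Int)) (nxt : List Int),
      vd.keys = vs → vs.Nodup → (∀ s ∈ seeds, s ∈ vs) →
      ∃ (vd' : PySem.Dict Int Int) (new : List Int),
        ns.foldl (pvAStep seeds d) (vd, q, pvCond hc0 (d + 1) nxt)
            = (vd', q ++ new.map (fun v => (v, d + 1)), pvCond hc0 (d + 1) (nxt ++ new))
        ∧ ns.foldl pvBStep (vs, nxt) = (vs ++ new, nxt ++ new)
        ∧ vd'.keys = vs ++ new ∧ (vs ++ new).Nodup ∧ (∀ x ∈ new, x ∈ ns) := by
  intro ns
  induction ns with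
  | nil =>
    intro vd vs q nxt hk hn hs
    exact ⟨vd, [], by simp, by simp, by simp [hk], by simpa using hn, by simp⟩
  | cons v ns IH =>
    intro vd vs q nxt hk hn hs
    simp only [List.foldl_cons]
    by_cases hv : v ∈ vs
    · have hcv : vd.contains v = true :=
        (PySem.Dict.contains_iff_mem_keys vd v).mpr (by rw [hk]; exact hv)
      have ha : pvAStep seeds d (vd, q, pvCond hc0 (d + 1) nxt) v
          = (vd, q, pvCond hc0 (d + 1) nxt) := by simp [pvAStep, hcv]
      have hb : pvBStep (vs, nxt) v = (vs, nxt) := by simp [pvBStep, hv]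
      rw [ha, hb]
      obtain ⟨vd', new, h1, h2, h3, h4, h5⟩ := IH vd vs q nxt hk hn hs
      exact ⟨vd', new, h1, h2, h3, h4, fun x hx => List.mem_cons_of_mem _ (h5 x hx)⟩
    · have hcv : vd.contains v = false := by
        cases hcc : vd.contains v with
        | false => rfl
        | true =>
          exact absurd ((PySem.Dict.contains_iff_mem_keys vd v).mp hcc) (by rw [hk]; exact hv)
      have hvseeds : v ∉ seeds := fun h => hv (hs v h)
      have hsv : seeds.contains v = false := by simpa using hvseeds
      have ha : pvAStep seeds d (vd, q, pvCond hc0 (d + 1) nxt) v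
          = (vd.insert v (d + 1), q ++ [(v, d + 1)], pvCond hc0 (d + 1) (nxt ++ [v])) := by
        simp only [pvAStep, hcv, hsv, Bool.false_eq_true, if_false]
        rw [pvCond_bump hc0 (d + 1) nxt v hhc]
      have hb : pvBStep (vs, nxt) v = (vs ++ [v], nxt ++ [v]) := by
        simp [pvBStep, hv]
      rw [ha, hb]
      obtain ⟨vd', new, h1, h2, h3, h4, h5⟩ :=
        IH (vd.insert v (d + 1)) (vs ++ [v]) (q ++ [(v, d + 1)]) (nxt ++ [v])
          (by rw [PySem.Dict.keys_insert_of_not_contains vd _ hcv, hk])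
          (hn.append (List.nodup_singleton v)
            (by intro a ha' hb'; simp at hb'; subst hb'; exact hv ha'))
          (fun s hsm => List.mem_append_left _ (hs s hsm))
      refine ⟨vd', v :: new, ?_, ?_, ?_, ?_, ?_⟩
      · simpa [List.append_assoc] using h1
      · simpa [List.append_assoc] using h2
      · simpa [List.append_assoc] using h3
      · simpa [List.append_assoc] using h4
      · intro x hx
        rcases List.mem_cons.mp hx with h | h
        · subst h; exact List.mem_cons_self ..
        · exact List.mem_cons_of_mem _ (h5 x h)

-- processing one whole level
theorem pvLevel (adjD : PySem.Dict Int (List Int)) (seeds : List Int) (maxh d : Int)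
    (hd : ¬ maxh ≤ d) (hc0 : PySem.Dict Int Int) (hhc : hc0.contains (d + 1) = false) :
    ∀ (fr : List Int) (fuel : Nat) (vd : PySem.Dict Int Int) (vs : PySem.Set Int)
      (nxt : List Int),
      vd.keys = vs → vs.Nodup → (∀ s ∈ seeds, s ∈ vs) →
      ∃ (vd' : PySem.Dict Int Int) (new : List Int),
        pvALoop adjD seeds maxh (fuel + fr.length)
            (fr.map (fun v => (v, d)) ++ nxt.map (fun v => (v, d + 1))) vd
            (pvCond hc0 (d + 1) nxt)
          = pvALoop adjD seeds maxh fuel ((nxt ++ new).map (fun v => (v, d + 1))) vd'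
              (pvCond hc0 (d + 1) (nxt ++ new))
        ∧ fr.foldl (pvBNode adjD) (vs, nxt) = (vs ++ new, nxt ++ new)
        ∧ vd'.keys = vs ++ new ∧ (vs ++ new).Nodup ∧ (∀ x ∈ new, x ∈ pvFlat adjD) := by
  intro fr
  induction fr with
  | nil =>
    intro fuel vd vs nxt hk hn hs
    exact ⟨vd, [], by simp, by simp, by simp [hk], by simpa using hn, by simp⟩
  | cons u fr IH =>
    intro fuel vd vs nxt hk hn hs
    obtain ⟨vd₁, new₁, ha1, hb1, hk1, hn1, hm1⟩ :=
      pvNode_corr seeds d hc0 hhc (adjD.getD u []) vd vs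
        (fr.map (fun v => (v, d)) ++ nxt.map (fun v => (v, d + 1))) nxt hk hn hs
    obtain ⟨vd₂, new₂, ha2, hb2, hk2, hn2, hm2⟩ :=
      IH fuel vd₁ (vs ++ new₁) (nxt ++ new₁) hk1 hn1
        (fun s hsm => List.mem_append_left _ (hs s hsm))
    refine ⟨vd₂, new₁ ++ new₂, ?_, ?_, ?_, ?_, ?_⟩
    · have hsucc : fuel + (u :: fr).length = (fuel + fr.length) + 1 := by
        simp only [List.length_cons]; omega
      rw [hsucc]
      have hq : ((u :: fr).map (fun v => (v, d)) ++ nxt.map (fun v => (v, d + 1)))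
          = (u, d) :: (fr.map (fun v => (v, d)) ++ nxt.map (fun v => (v, d + 1))) := by simp
      rw [hq]
      simp only [pvALoop]
      rw [if_neg hd]
      rw [ha1]
      show pvALoop adjD seeds maxh (fuel + fr.length)
          ((fr.map (fun v => (v, d)) ++ nxt.map (fun v => (v, d + 1)))
            ++ new₁.map (fun v => (v, d + 1)))
          vd₁ (pvCond hc0 (d + 1) (nxt ++ new₁)) = _
      have hrw : (fr.map (fun v => (v, d)) ++ nxt.map (fun v => (v, d + 1)))
            ++ new₁.map (fun v => (v, d + 1))
          = fr.map (fun v => (v, d)) ++ (nxt ++ new₁).map (fun v => (v, d + 1)) := by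
        simp [List.append_assoc]
      rw [hrw, ha2]
      simp [List.append_assoc]
    · simp only [List.foldl_cons]
      have hbn : pvBNode adjD (vs, nxt) u = (vs ++ new₁, nxt ++ new₁) := by
        simpa [pvBNode] using hb1
      rw [hbn, hb2]
      simp [List.append_assoc]
    · rw [hk2]; simp [List.append_assoc]
    · simpa [List.append_assoc] using hn2
    · intro x hx
      rcases List.mem_append.mp hx with h | h
      · exact pvMem_getD_flat adjD u x (hm1 x h)
      · exact hm2 x h

-- A discards every entry at distance ≥ max_hops
theorem pvSkip (adjD : PySem.Dict Int (List Int)) (seeds : List Int) (maxh d : Int)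
    (hd : maxh ≤ d) :
    ∀ (fr : List Int) (fuel : Nat) (vd hc : PySem.Dict Int Int),
      fr.length + 1 ≤ fuel →
      pvALoop adjD seeds maxh fuel (fr.map (fun v => (v, d))) vd hc = hc := by
  intro fr
  induction fr with
  | nil =>
    intro fuel vd hc h
    obtain ⟨f, rfl⟩ : ∃ f, fuel = f + 1 := ⟨fuel - 1, by omega⟩
    simp [pvALoop]
  | cons u fr IH =>
    intro fuel vd hc h
    obtain ⟨f, rfl⟩ : ∃ f, fuel = f + 1 := ⟨fuel - 1, by omega⟩
    simp only [List.map_cons]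
    simp only [pvALoop]
    rw [if_pos hd]
    exact IH f vd hc (by simp only [List.length_cons] at h; omega)

-- main induction, level by level
theorem pvOuter (adjD : PySem.Dict Int (List Int)) (seeds : List Int) (maxh : Int) :
    ∀ (fuel : Nat) (d : Int) (fr : List Int) (vd : PySem.Dict Int Int)
      (vs extra : List Int) (hc : PySem.Dict Int Int),
      vs = PySem.Set.ofList seeds ++ extra → (∀ x ∈ extra, x ∈ pvFlat adjD) →
      vd.keys = vs → vs.Nodup → (∀ k ∈ hc.keys, k ≤ d) →
      fr.length + (PySem.Set.ofList seeds).length + (pvFlat adjD).length + 1 ≤ fuel + vs.length →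
      pvALoop adjD seeds maxh fuel (fr.map (fun v => (v, d))) vd hc
        = pvBLoop adjD (maxh - d).toNat d fr vs hc := by
  intro fuel
  induction fuel using Nat.strong_induction_on with
  | _ fuel IH =>
  intro d fr vd vs extra hc hvs hex hk hn hhck hfuel
  have hex_nodup : extra.Nodup := by
    rw [hvs] at hn; exact hn.of_append_right
  have hsub : extra.Subperm (pvFlat adjD) :=
    List.subperm_of_subset hex_nodup (fun x hx => hex x hx)
  have hvslen : vs.length ≤ (PySem.Set.ofList seeds).length + (pvFlat adjD).length := by
    have hl := hsub.length_le
    rw [hvs, List.length_append]; omega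
  have hfr1 : fr.length + 1 ≤ fuel := by omega
  cases fr with
  | nil =>
    obtain ⟨f, rfl⟩ : ∃ f, fuel = f + 1 := ⟨fuel - 1, by omega⟩
    cases hr : (maxh - d).toNat with
    | zero => simp [pvALoop, pvBLoop]
    | succ r => simp [pvALoop, pvBLoop]
  | cons u fr' =>
    by_cases hmd : maxh ≤ d
    · have h0 : (maxh - d).toNat = 0 := by omega
      rw [h0, pvSkip adjD seeds maxh d hmd (u :: fr') fuel vd hc hfr1]
      rfl
    · have hstep : (maxh - d).toNat = (maxh - (d + 1)).toNat + 1 := by omega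
      have hcfresh : hc.contains (d + 1) = false := by
        cases hcc : hc.contains (d + 1) with
        | false => rfl
        | true =>
          have := hhck (d + 1) ((PySem.Dict.contains_iff_mem_keys hc (d + 1)).mp hcc)
          omega
      have hseeds : ∀ s ∈ seeds, s ∈ vs := by
        intro s hsm
        rw [hvs]
        exact List.mem_append_left _ (by simpa [PySem.Set.mem_ofList] using hsm)
      obtain ⟨vd', new, ha, hb, hk', hn', hm'⟩ :=
        pvLevel adjD seeds maxh d hmd hc hcfresh (u :: fr')
          (fuel - (u :: fr').length) vd vs [] hk hn hseeds
      simp only [List.map_nil, List.append_nil, List.nil_append] at ha hb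
      have e1 : fuel - (u :: fr').length + (u :: fr').length = fuel := by omega
      rw [e1] at ha
      rw [show pvCond hc (d + 1) [] = hc from rfl] at ha
      rw [hstep]
      simp only [pvBLoop, List.isEmpty_cons, Bool.false_eq_true, if_false]
      rw [hb]
      rw [ha]
      have hx : (u :: fr').length = fr'.length + 1 := rfl
      exact IH (fuel - (u :: fr').length) (by omega) (d + 1) new vd' (vs ++ new)
        (extra ++ new) (pvCond hc (d + 1) new)
        (by rw [hvs, List.append_assoc])
        (by intro x hx
            rcases List.mem_append.mp hx with h | h
            exacts [hex x h, hm' x h])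
        hk' hn'
        (by intro k hkm
            by_cases hne : new = []
            · subst hne
              rw [show pvCond hc (d + 1) ([] : List Int) = hc from rfl] at hkm
              have := hhck k hkm; omega
            · have hcond : pvCond hc (d + 1) new = hc.insert (d + 1) (new.length : Int) := by
                cases new with
                | nil => exact absurd rfl hne
                | cons a t => rfl
              rw [hcond, PySem.Dict.keys_insert_of_not_contains hc _ hcfresh] at hkm
              rcases List.mem_append.mp hkm with h | h
              · have := hhck k h; omega
              · simp at h; omega)
        (by rw [List.length_append]; omega)


-- ===== VERDICT (by name: the statement is the Claim_ definition above) =====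
theorem count_neighbors_at_hop_spec : Claim_equal_count_neighbors_at_hop := by
  intro adj seeds max_hops _
  show count_neighbors_at_hop adj seeds max_hops = count_neighbors_at_hop_alt adj seeds max_hops
  have hkeys0 : (seeds.foldl (fun d s => d.insert s (0 : Int)) PySem.Dict.empty).keys
      = PySem.Set.ofList seeds := by
    rw [PySem.Dict.keys_foldl_insert seeds (fun _ _ => (0 : Int)) PySem.Dict.empty]
    simp [PySem.Dict.keys_empty, PySem.Set.update_nil_left]
  have hflat : pvFlat (PySem.Dict.mk adj) = adj.flatMap (fun p => p.2) := rfl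
  have h := pvOuter (PySem.Dict.mk adj) seeds max_hops
      (seeds.length + (adj.flatMap (fun p => p.2)).length + 1) 0 seeds
      (seeds.foldl (fun d s => d.insert s (0 : Int)) PySem.Dict.empty)
      (PySem.Set.ofList seeds) [] PySem.Dict.empty
      (by simp) (by simp) hkeys0 (PySem.Set.nodup_ofList seeds)
      (by intro k hkm; simp [PySem.Dict.keys_empty] at hkm)
      (by rw [hflat]; omega)
  rw [Int.sub_zero] at h
  exact congrArg PySem.Dict.items h
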